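-- pv_equiv track=rewrite | github.com/solitasroh/rkit | scripts/cpp-static-analysis/project_graph.py | _normalize_type_name
-- ===== SOURCE A (Python) =====
-- _TYPE_SUFFIX_STRIP = ("*", "&", "&&")
--
-- _TYPE_QUALIFIER_WORDS = frozenset({
--     "const", "volatile", "mutable", "static", "inline", "constexpr",
--     "struct", "class", "enum", "typename",
-- })
--
-- _SMART_POINTER_PREFIXES = (
--     "std::shared_ptr<", "shared_ptr<",
--     "std::unique_ptr<", "unique_ptr<",
--     "std::weak_ptr<", "weak_ptr<",
-- )
--
-- def _strip_suffixes(s: str) -> str: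
--     """포인터/참조 접미사 (`*`, `&`, `&&`) 반복 제거."""
--     changed = True
--     while changed:
--         changed = False
--         for suffix in _TYPE_SUFFIX_STRIP:
--             if s.endswith(suffix):
--                 s = s[:-len(suffix)].strip()
--                 changed = True
--     return s
--
-- def _strip_qualifiers(s: str) -> str:
--     """선두 const/volatile/class/struct 등 수식어 제거."""
--     tokens = s.split()
--     while tokens and tokens[0] in _TYPE_QUALIFIER_WORDS:
--         tokens.pop(0)
--     return " ".join(tokens)
--
-- def _unwrap_smart_pointer(s: str) -> str | None:
--     """smart pointer 패턴이면 내부 타입 추출, 아니면 None."""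
--     for prefix in _SMART_POINTER_PREFIXES:
--         if s.startswith(prefix):
--             inner = s[len(prefix):]
--             if inner.endswith(">"):
--                 inner = inner[:-1]
--             if "," in inner:  # shared_ptr<T, Deleter>
--                 inner = inner.split(",", 1)[0]
--             return inner
--     return None
--
-- def _normalize_type_name(raw: str) -> str:
--     """타입 문자열에서 베이스 클래스 식별자를 추출 (§2.4)."""
--     s = raw.strip()
--     if not s:
--         return ""
--     s = _strip_suffixes(s)
--     s = _strip_qualifiers(s)
--     inner = _unwrap_smart_pointer(s)
--     if inner is not None:
--         return _normalize_type_name(inner)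
--     if "<" in s:  # 템플릿 base만 유지
--         s = s.split("<", 1)[0].strip()
--     return s
-- ===== SOURCE B (Python) =====
-- _TYPE_QUALIFIER_WORDS = frozenset({
--     "const", "volatile", "mutable", "static", "inline", "constexpr",
--     "struct", "class", "enum", "typename",
-- })
--
-- _BARE_SMART_POINTERS = ("shared_ptr<", "unique_ptr<", "weak_ptr<")
--
--
-- def _std_cut(s):
--     """Drop an optional leading 'std::'."""
--     return s[5:] if s.startswith("std::") else s
--
--
-- def _match_ptr(t):
--     """Remainder after a bare smart-pointer template prefix, else None."""
--     for p in _BARE_SMART_POINTERS: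
--         if t.startswith(p):
--             return t[len(p):]
--     return None
--
--
-- def _peel(inner):
--     """Clean one unwrapped smart-pointer payload: closing bracket and a deleter argument."""
--     if inner.endswith(">"):
--         inner = inner[:-1]
--     comma = inner.find(",")
--     return inner[:comma] if comma != -1 else inner
--
--
-- def _normalize_type_name(raw: str) -> str:
--     """Base-class identifier of a C++ type string (iterative smart-pointer peeling)."""
--     s = raw
--     while True:
--         s = s.strip()
--         if not s:
--             return ""
--         # trailing pointer/reference marks interleaved with whitespace == one rstrip over the char set
--         s = s.rstrip("*& \t\n\r\x0b\x0c")
--         # drop leading qualifier words; the join re-normalizes inner whitespace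
--         words = s.split()
--         i = 0
--         while i < len(words) and words[i] in _TYPE_QUALIFIER_WORDS:
--             i += 1
--         s = " ".join(words[i:])
--         rest = _match_ptr(_std_cut(s))
--         if rest is None:
--             cut = s.find("<")
--             base = s if cut == -1 else s[:cut]
--             return base.strip()
--         s = _peel(rest)
-- ===== Notes on version B (the rewrite author's own statement) =====
-- stated objective: alternative
-- what changed: Replaces A's tail recursion and its suffix strip-and-retry passes with an iterative while-loop that peels smart-pointer layers, a single character-set rstrip for the trailing pointer/reference marks, a dropWhile over the qualifier tokens, and a find/slice cut for the deleter argument and template base instead of split().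
import Mathlib
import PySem

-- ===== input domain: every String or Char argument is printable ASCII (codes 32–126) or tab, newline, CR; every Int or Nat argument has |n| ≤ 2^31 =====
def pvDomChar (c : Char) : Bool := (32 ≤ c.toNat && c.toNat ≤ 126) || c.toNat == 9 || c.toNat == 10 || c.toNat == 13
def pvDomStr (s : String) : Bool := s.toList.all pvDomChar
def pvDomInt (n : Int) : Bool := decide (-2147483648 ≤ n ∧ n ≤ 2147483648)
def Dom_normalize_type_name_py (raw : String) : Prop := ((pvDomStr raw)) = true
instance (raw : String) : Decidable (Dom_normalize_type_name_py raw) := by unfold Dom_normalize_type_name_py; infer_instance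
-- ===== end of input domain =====

-- B replaces A's tail recursion and per-suffix strip loop by an iterative peel with a single
-- character-set rstrip, a dropWhile over qualifier tokens, and a find/slice template split ("alternative").


-- Module constant _TYPE_QUALIFIER_WORDS (shared by both Pythons via the module scope)
def qualWords : List (List Char) :=
  ["const", "volatile", "mutable", "static", "inline", "constexpr",
   "struct", "class", "enum", "typename"].map String.toList

-- ===== PORT A =====

-- s[:-k].strip()  (Python s[:-k] = take (len - k); exact, clamps at 0 exactly as Python does)
def cutStrip (s : List Char) (k : Nat) : List Char :=
  PySem.Chars.strip (s.take (s.length - k))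

theorem strip_le (s : List Char) : (PySem.Chars.strip s).length ≤ s.length := by
  unfold PySem.Chars.strip PySem.Chars.rstrip PySem.Chars.lstrip
  calc (List.dropWhile PySem.Chars.isspace (List.dropWhile PySem.Chars.isspace s).reverse).reverse.length
      ≤ (List.dropWhile PySem.Chars.isspace s).reverse.length := by
        rw [List.length_reverse]; exact List.length_dropWhile_le _ _
    _ ≤ s.length := by rw [List.length_reverse]; exact List.length_dropWhile_le _ _

theorem cutStrip_le (s : List Char) (k : Nat) : (cutStrip s k).length ≤ s.length - k := by
  unfold cutStrip
  calc (PySem.Chars.strip (s.take (s.length - k))).length ≤ (s.take (s.length - k)).length :=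
        strip_le _
    _ ≤ s.length - k := by rw [List.length_take]; omega

-- one iteration of _strip_suffixes' while-body: the for-loop over ("*", "&", "&&") carrying (s, changed)
def sufStep (r : List Char × Bool) (suf : List Char) : List Char × Bool :=
  if PySem.Chars.endswith r.1 suf then (cutStrip r.1 suf.length, true) else r

def onePassA (s : List Char) : List Char × Bool :=
  [['*'], ['&'], ['&', '&']].foldl sufStep (s, false)

theorem endswith_len {s p : List Char} (h : PySem.Chars.endswith s p = true) :
    p.length ≤ s.length :=
  ((PySem.Chars.endswith_iff s p).mp h).length_le

theorem sufStep_inv (suf : List Char) (hsuf : suf ≠ []) (r : List Char × Bool) (s0 : Nat)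
    (h1 : r.1.length ≤ s0) (h2 : r.2 = true → r.1.length < s0) :
    (sufStep r suf).1.length ≤ s0 ∧ ((sufStep r suf).2 = true → (sufStep r suf).1.length < s0) := by
  unfold sufStep
  split
  case isTrue h =>
    have hc := cutStrip_le r.1 suf.length
    have hk := endswith_len h
    have hk1 : 1 ≤ suf.length := List.length_pos_iff.mpr hsuf
    constructor
    · simp only; omega
    · intro _; simp only; omega
  case isFalse h => exact ⟨h1, h2⟩

theorem onePassA_le (s : List Char) : (onePassA s).1.length ≤ s.length := by
  unfold onePassA
  simp only [List.foldl_cons, List.foldl_nil]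
  have i1 := sufStep_inv ['*'] (by simp) (s, false) s.length (le_refl _) (by simp)
  have i2 := sufStep_inv ['&'] (by simp) _ s.length i1.1 i1.2
  exact (sufStep_inv ['&', '&'] (by simp) _ s.length i2.1 i2.2).1

theorem onePassA_lt (s : List Char) (h : (onePassA s).2 = true) :
    (onePassA s).1.length < s.length := by
  have i1 := sufStep_inv ['*'] (by simp) (s, false) s.length (le_refl _) (by simp)
  have i2 := sufStep_inv ['&'] (by simp) _ s.length i1.1 i1.2
  have i3 := sufStep_inv ['&', '&'] (by simp) _ s.length i2.1 i2.2
  unfold onePassA at h ⊢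
  simp only [List.foldl_cons, List.foldl_nil] at h ⊢
  exact i3.2 h

-- while changed: loop of _strip_suffixes
def stripSuffixesA (s : List Char) : List Char :=
  match h : onePassA s with
  | (s', true) => stripSuffixesA s'
  | (s', false) => s'
termination_by s.length
decreasing_by
  have := onePassA_lt s (by rw [h])
  rw [h] at this; exact this

-- tokens-pop-while loop of _strip_qualifiers
def dropQualA : List (List Char) → List (List Char)
  | [] => []
  | t :: ts => if qualWords.contains t then dropQualA ts else t :: ts

def stripQualifiersA (s : List Char) : List Char :=
  PySem.Chars.join [' '] (dropQualA (PySem.Chars.split₀ s))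

-- Module constant _SMART_POINTER_PREFIXES
def smartPrefixesA : List (List Char) :=
  ["std::shared_ptr<", "shared_ptr<", "std::unique_ptr<", "unique_ptr<",
   "std::weak_ptr<", "weak_ptr<"].map String.toList

-- _unwrap_smart_pointer: the for-loop over the prefixes
def unwrapA : List (List Char) → List Char → Option (List Char)
  | [], _ => none
  | p :: ps, s =>
    if PySem.Chars.startswith s p then
      let inner := s.drop p.length
      let inner := if PySem.Chars.endswith inner ['>'] then inner.dropLast else inner
      -- inner.split(",", 1)[0] = everything before the first comma
      let inner := if PySem.Chars.isIn [','] inner then inner.takeWhile (fun c => c ≠ ',') else inner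
      some inner
    else unwrapA ps s

theorem startswith_len {s p : List Char} (h : PySem.Chars.startswith s p = true) :
    p.length ≤ s.length :=
  ((PySem.Chars.startswith_iff s p).mp h).length_le

theorem unwrapA_some_lt (ps : List (List Char)) (s inner : List Char)
    (hne : ∀ p ∈ ps, p ≠ []) (h : unwrapA ps s = some inner) : inner.length < s.length := by
  induction ps with
  | nil => simp [unwrapA] at h
  | cons p ps ih =>
    rw [unwrapA] at h
    split at h
    case isTrue hst =>
      have hp : p.length ≤ s.length := startswith_len hst
      have hp1 : 1 ≤ p.length := List.length_pos_iff.mpr (hne p (by simp))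
      have hd : (s.drop p.length).length < s.length := by
        rw [List.length_drop]; omega
      simp only [Option.some.injEq] at h
      subst h
      refine lt_of_le_of_lt ?_ hd
      split <;> split <;>
        first
          | exact le_trans (List.takeWhile_sublist _).length_le (List.dropLast_sublist _).length_le
          | exact (List.takeWhile_sublist _).length_le
          | exact (List.dropLast_sublist _).length_le
          | exact le_refl _
    case isFalse hst => exact ih (fun q hq => hne q (by simp [hq])) h

theorem stripSuffixesA_le (s : List Char) : (stripSuffixesA s).length ≤ s.length := by
  induction s using stripSuffixesA.induct with
  | case1 s s' h ih =>
    rw [stripSuffixesA, h]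
    have := onePassA_lt s (by rw [h])
    rw [h] at this
    exact le_trans ih (le_of_lt this)
  | case2 s s' h =>
    rw [stripSuffixesA, h]
    have := onePassA_le s
    rw [h] at this
    exact this


theorem join_len_cons_le (t : List Char) (ts : List (List Char)) :
    (PySem.Chars.join [' '] ts).length ≤ (PySem.Chars.join [' '] (t :: ts)).length := by
  cases ts with
  | nil => simp [PySem.Chars.join_nil, PySem.Chars.join_singleton]
  | cons u us => rw [PySem.Chars.join_cons_cons]; simp; omega

theorem join_len_dropWhile_le (q : List Char → Bool) (ts : List (List Char)) :
    (PySem.Chars.join [' '] (List.dropWhile q ts)).length ≤ (PySem.Chars.join [' '] ts).length := by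
  induction ts with
  | nil => simp
  | cons t ts ih =>
    rw [List.dropWhile_cons]
    split
    · exact le_trans ih (join_len_cons_le t ts)
    · exact le_refl _

theorem join_len_append_singleton (ts : List (List Char)) (t : List Char) :
    (PySem.Chars.join [' '] (ts ++ [t])).length
      = (PySem.Chars.join [' '] ts).length + t.length + (if ts.isEmpty then 0 else 1) := by
  induction ts with
  | nil => simp [PySem.Chars.join_singleton]
  | cons a ts ih =>
    cases ts with
    | nil =>
      simp [PySem.Chars.join_singleton, PySem.Chars.join_cons_cons, PySem.Chars.join_nil]
      omega
    | cons b ts2 =>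
      rw [show (a :: b :: ts2) ++ [t] = a :: ((b :: ts2) ++ [t]) from rfl,
        show (b :: ts2) ++ [t] = b :: (ts2 ++ [t]) from rfl]
      rw [PySem.Chars.join_cons_cons, PySem.Chars.join_cons_cons]
      rw [show b :: (ts2 ++ [t]) = (b :: ts2) ++ [t] from rfl]
      simp only [List.length_append, ih]
      simp
      omega

theorem split₀_go_len (s : List Char) : ∀ (cur : List Char) (acc : List (List Char)),
    (PySem.Chars.join [' '] (PySem.Chars.split₀.go s cur acc)).length
      ≤ (PySem.Chars.join [' '] acc.reverse).length
        + (if acc.isEmpty then 0 else 1) + cur.length + s.length := by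
  induction s with
  | nil =>
    intro cur acc
    rw [PySem.Chars.split₀.go]
    split
    · simp_all
    · rw [show (cur.reverse :: acc).reverse = acc.reverse ++ [cur.reverse] from by simp]
      rw [join_len_append_singleton]
      simp_all [List.isEmpty_iff]
      split <;> simp_all [List.isEmpty_iff] <;> omega
  | cons c rest ih =>
    intro cur acc
    rw [PySem.Chars.split₀.go]
    split
    · split
      · have := ih [] acc
        simp at this ⊢
        omega
      · have := ih [] (cur.reverse :: acc)
        simp only [List.isEmpty_cons, List.reverse_cons] at this ⊢
        rw [join_len_append_singleton] at this
        simp at this ⊢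
        split at this <;> simp_all [List.isEmpty_iff] <;> omega
    · have := ih (c :: cur) acc
      simp at this ⊢
      split at this <;> split <;> simp_all [List.isEmpty_iff] <;> omega

theorem join_dropWhile_split₀_le (q : List Char → Bool) (s : List Char) :
    (PySem.Chars.join [' '] (List.dropWhile q (PySem.Chars.split₀ s))).length ≤ s.length := by
  refine le_trans (join_len_dropWhile_le q _) ?_
  have := split₀_go_len s [] []
  simpa [PySem.Chars.split₀] using this

theorem dropQualA_eq_dropWhile (ts : List (List Char)) :
    dropQualA ts = ts.dropWhile (fun t => qualWords.contains t) := by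
  induction ts with
  | nil => rfl
  | cons t ts ih => rw [dropQualA, List.dropWhile_cons]; split <;> simp_all

theorem stripQualifiersA_le (s : List Char) : (stripQualifiersA s).length ≤ s.length := by
  unfold stripQualifiersA
  rw [dropQualA_eq_dropWhile]
  exact join_dropWhile_split₀_le _ s

-- _normalize_type_name (A)
def normA (raw : List Char) : List Char :=
  let s := PySem.Chars.strip raw
  if hs : s.isEmpty then []
  else
    let s1 := stripSuffixesA s
    let s2 := stripQualifiersA s1
    match hu : unwrapA smartPrefixesA s2 with
    | some inner => normA inner
    | none =>
      -- s.split("<", 1)[0].strip() = strip of everything before the first '<'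
      if PySem.Chars.isIn ['<'] s2 then PySem.Chars.strip (s2.takeWhile (fun c => c ≠ '<')) else s2
termination_by raw.length
decreasing_by
  have h1 : inner.length < s2.length := by
    refine unwrapA_some_lt smartPrefixesA s2 inner ?_ hu
    intro p hp; fin_cases hp <;> simp
  have h2 : s2.length ≤ s1.length := stripQualifiersA_le s1
  have h3 : s1.length ≤ s.length := stripSuffixesA_le s
  have h4 : s.length ≤ raw.length := strip_le raw
  omega

def normalize_type_name_py (raw : String) : String := String.ofList (normA raw.toList)

-- ===== PORT B =====

-- B's char set for s.rstrip("*& \t\n\r\x0b\x0c")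
def rsetChars : List Char := ['*', '&', ' ', '\t', '\n', '\r', '\x0b', '\x0c']

-- s.rstrip(chars): drop trailing chars that are in the set (exact)
def rstripSetB (s : List Char) : List Char :=
  (s.reverse.dropWhile (fun c => rsetChars.contains c)).reverse

-- Module constant _BARE_SMART_POINTERS
def bPtrPrefixes : List (List Char) := ["shared_ptr<", "unique_ptr<", "weak_ptr<"].map String.toList

-- B's prefix scan: first matching bare pointer template, returning the remainder
def findPrefixB : List (List Char) → List Char → Option (List Char)
  | [], _ => none
  | p :: ps, t => if PySem.Chars.startswith t p then some (t.drop p.length) else findPrefixB ps t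

theorem findPrefixB_some_lt (ps : List (List Char)) (t inner : List Char)
    (hne : ∀ p ∈ ps, p ≠ []) (h : findPrefixB ps t = some inner) : inner.length < t.length := by
  induction ps with
  | nil => simp [findPrefixB] at h
  | cons p ps ih =>
    rw [findPrefixB] at h
    split at h
    case isTrue hst =>
      have hp : p.length ≤ t.length := startswith_len hst
      have hp1 : 1 ≤ p.length := List.length_pos_iff.mpr (hne p (by simp))
      simp only [Option.some.injEq] at h
      subst h
      rw [List.length_drop]; omega
    case isFalse hst => exact ih (fun q hq => hne q (by simp [hq])) h

theorem slice_le {α : Type} (s : List α) (a b : Option Int) :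
    (PySem.List.slice s a b).length ≤ s.length := by
  unfold PySem.List.slice
  exact le_trans (List.take_sublist _ _).length_le (List.drop_sublist _ _).length_le

-- _std_cut: drop an optional leading "std::"
def stdCutB (s : List Char) : List Char :=
  if PySem.Chars.startswith s "std::".toList then s.drop 5 else s

-- _peel: remove a closing '>' and a ", Deleter" tail
def peelB (inner : List Char) : List Char :=
  let inner1 := if PySem.Chars.endswith inner ['>'] then inner.dropLast else inner
  let comma := PySem.Chars.find inner1 [',']
  if comma ≠ -1 then PySem.List.slice inner1 none (some comma) else inner1

theorem peelB_le (inner : List Char) : (peelB inner).length ≤ inner.length := by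
  unfold peelB
  dsimp only
  split <;> split <;>
    first
      | exact le_trans (slice_le _ _ _) (List.dropLast_sublist _).length_le
      | exact le_trans (slice_le _ _ _) (le_refl _)
      | exact (List.dropLast_sublist _).length_le
      | exact le_refl _

theorem stdCutB_le (s : List Char) : (stdCutB s).length ≤ s.length := by
  unfold stdCutB
  split
  · rw [List.length_drop]; omega
  · exact le_refl _

theorem rstripSetB_le (s : List Char) : (rstripSetB s).length ≤ s.length := by
  unfold rstripSetB
  rw [List.length_reverse]
  exact le_trans (List.length_dropWhile_le _ _) (by rw [List.length_reverse])

-- _normalize_type_name (B): the while-True loop, one recursive step per peeled layer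
def normB (raw : List Char) : List Char :=
  let s := PySem.Chars.strip raw
  if hs : s.isEmpty then []
  else
    -- rstrip over the char set, then the qualifier-word index loop (words[i:] = dropWhile) and join
    let s2 := PySem.Chars.join [' ']
      ((PySem.Chars.split₀ (rstripSetB s)).dropWhile (fun t => qualWords.contains t))
    match hf : findPrefixB bPtrPrefixes (stdCutB s2) with
    | none =>
      let cut := PySem.Chars.find s2 ['<']
      let base := if cut == -1 then s2 else PySem.List.slice s2 none (some cut)
      PySem.Chars.strip base
    | some rest => normB (peelB rest)
termination_by raw.length
decreasing_by
  have h0 : rest.length < (stdCutB s2).length := by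
    refine findPrefixB_some_lt bPtrPrefixes _ rest ?_ hf
    intro p hp; fin_cases hp <;> simp
  have h1 : (peelB rest).length ≤ rest.length := peelB_le rest
  have h2 : (stdCutB s2).length ≤ s2.length := stdCutB_le s2
  have h3 : s2.length ≤ (rstripSetB s).length := join_dropWhile_split₀_le _ _
  have h4 : (rstripSetB s).length ≤ s.length := rstripSetB_le s
  have h5 : s.length ≤ raw.length := strip_le raw
  omega

def normalize_type_name_py_alt (raw : String) : String := String.ofList (normB raw.toList)

-- ===== PRECONDITION & SPEC =====
def Spec_normalize_type_name_py (raw : String) (out : String) : Prop := out = normalize_type_name_py_alt raw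
instance (raw : String) (out : String) : Decidable (Spec_normalize_type_name_py raw out) := by unfold Spec_normalize_type_name_py; infer_instance

-- ===== CLAIM (what is proved, stated in full; the proofs are below) =====
def Claim_equal_normalize_type_name_py : Prop := ∀ (raw : String), Dom_normalize_type_name_py raw → Spec_normalize_type_name_py raw (normalize_type_name_py raw)

-- ===== LEMMAS AND PROOFS =====

-- ---- character-level facts on the input domain ----

theorem chToNat_inj (c d : Char) : c.toNat = d.toNat ↔ c = d := by
  constructor
  · intro h2; exact Char.ofNat_toNat c ▸ Char.ofNat_toNat d ▸ congrArg Char.ofNat h2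
  · intro h2; rw [h2]

theorem chEq (c d : Char) : (c == d) = decide (c.toNat = d.toNat) := by
  by_cases hc : c = d
  · simp [hc]
  · have hn : c.toNat ≠ d.toNat := fun h => hc ((chToNat_inj c d).mp h)
    simp [hc, hn]

theorem isspace_dom (c : Char) (h : pvDomChar c = true) :
    PySem.Chars.isspace c = (c == ' ' || c == '\t' || c == '\n' || c == '\r') := by
  simp only [pvDomChar, Bool.or_eq_true, Bool.and_eq_true, decide_eq_true_eq, Nat.beq_eq_true_eq] at h
  rw [PySem.Chars.isspace, chEq, chEq, chEq, chEq, Bool.eq_iff_iff]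
  simp only [show (' ').toNat = 32 from rfl, show ('\t').toNat = 9 from rfl,
    show ('\n').toNat = 10 from rfl, show ('\r').toNat = 13 from rfl,
    Bool.or_eq_true, Bool.and_eq_true, decide_eq_true_eq]
  omega

theorem rset_dom (c : Char) (h : pvDomChar c = true) :
    rsetChars.contains c = (PySem.Chars.isspace c || c == '*' || c == '&') := by
  rw [isspace_dom c h]
  simp only [pvDomChar, Bool.or_eq_true, Bool.and_eq_true, decide_eq_true_eq, Nat.beq_eq_true_eq] at h
  simp only [rsetChars, List.contains_cons, List.contains_nil, Bool.or_false, chEq]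
  rw [Bool.eq_iff_iff]
  simp only [Bool.or_eq_true, decide_eq_true_eq,
    show ('*').toNat = 42 from rfl, show ('&').toNat = 38 from rfl,
    show (' ').toNat = 32 from rfl, show ('\t').toNat = 9 from rfl,
    show ('\n').toNat = 10 from rfl, show ('\r').toNat = 13 from rfl,
    show ('\x0b').toNat = 11 from rfl, show ('\x0c').toNat = 12 from rfl]
  omega

theorem isspace_imp_rset (c : Char) (h : pvDomChar c = true)
    (hs : PySem.Chars.isspace c = true) : rsetChars.contains c = true := by
  rw [rset_dom c h, hs]; rfl

-- ---- dropWhile / strip structure ----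

theorem dw_imp (p q : Char → Bool) (l : List Char) (h : ∀ c ∈ l, q c = true → p c = true) :
    List.dropWhile p (List.dropWhile q l) = List.dropWhile p l := by
  induction l with
  | nil => rfl
  | cons c r ih =>
    rw [List.dropWhile_cons, List.dropWhile_cons]
    by_cases hq : q c = true
    · rw [if_pos hq, if_pos (h c (by simp) hq), ih (fun d hd => h d (by simp [hd]))]
    · rw [if_neg hq, List.dropWhile_cons]

theorem lstrip_lstrip (s : List Char) : PySem.Chars.lstrip (PySem.Chars.lstrip s) = PySem.Chars.lstrip s := by
  unfold PySem.Chars.lstrip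
  exact List.dropWhile_idempotent _ s

theorem rstrip_rstrip (s : List Char) : PySem.Chars.rstrip (PySem.Chars.rstrip s) = PySem.Chars.rstrip s := by
  unfold PySem.Chars.rstrip
  rw [List.reverse_reverse, List.dropWhile_idempotent]

theorem lstrip_eq_self_of_head (s : List Char)
    (h : ∀ (hl : 0 < s.length), PySem.Chars.isspace s[0] = false) :
    PySem.Chars.lstrip s = s := by
  unfold PySem.Chars.lstrip
  rw [List.dropWhile_eq_self_iff]
  intro hl
  simp [h hl]

theorem head_of_lstrip_free (s : List Char) (h : PySem.Chars.lstrip s = s) (hl : 0 < s.length) :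
    PySem.Chars.isspace s[0] = false := by
  unfold PySem.Chars.lstrip at h
  rw [List.dropWhile_eq_self_iff] at h
  simpa using h hl

theorem lstrip_take (s : List Char) (n : Nat) (h : PySem.Chars.lstrip s = s) :
    PySem.Chars.lstrip (s.take n) = s.take n := by
  apply lstrip_eq_self_of_head
  intro hl
  have hn : 0 < s.length := by
    rw [List.length_take] at hl; omega
  have : (s.take n)[0] = s[0] := by
    rw [List.getElem_take]
  rw [this]
  exact head_of_lstrip_free s h hn

theorem rstrip_prefix (s : List Char) : PySem.Chars.rstrip s <+: s := by
  unfold PySem.Chars.rstrip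
  have h1 : List.dropWhile PySem.Chars.isspace s.reverse <:+ s.reverse := List.dropWhile_suffix _
  simpa using List.reverse_prefix.mpr h1

theorem lstrip_rstrip_comm (s : List Char) (h : PySem.Chars.lstrip s = s) :
    PySem.Chars.lstrip (PySem.Chars.rstrip s) = PySem.Chars.rstrip s := by
  have hp := rstrip_prefix s
  rw [List.prefix_iff_eq_take] at hp
  rw [hp]
  exact lstrip_take s _ h

theorem lstrip_strip (s : List Char) : PySem.Chars.lstrip (PySem.Chars.strip s) = PySem.Chars.strip s := by
  unfold PySem.Chars.strip
  exact lstrip_rstrip_comm _ (lstrip_lstrip s)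

theorem rstrip_strip (s : List Char) : PySem.Chars.rstrip (PySem.Chars.strip s) = PySem.Chars.strip s := by
  unfold PySem.Chars.strip
  exact rstrip_rstrip _

-- ---- rstripSetB structure and L1: stripSuffixesA = rstripSetB on stripped dom strings ----

theorem rb_append_mem (xs : List Char) (c : Char) (h : rsetChars.contains c = true) :
    rstripSetB (xs ++ [c]) = rstripSetB xs := by
  unfold rstripSetB
  rw [List.reverse_append, List.reverse_singleton, List.singleton_append, List.dropWhile_cons, if_pos h]

theorem rb_append_all (xs suf : List Char) (h : ∀ c ∈ suf, rsetChars.contains c = true) :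
    rstripSetB (xs ++ suf) = rstripSetB xs := by
  induction suf generalizing xs with
  | nil => simp
  | cons c cs ih =>
    rw [show xs ++ (c :: cs) = (xs ++ [c]) ++ cs from by simp]
    rw [ih (xs ++ [c]) (fun d hd => h d (by simp [hd])), rb_append_mem xs c (h c (by simp))]

theorem rb_last_not (xs : List Char) (c : Char) (h : rsetChars.contains c = false) :
    rstripSetB (xs ++ [c]) = xs ++ [c] := by
  unfold rstripSetB
  rw [List.reverse_append, List.reverse_singleton, List.singleton_append, List.dropWhile_cons,
    if_neg (by rw [h]; simp)]
  simp

theorem rb_rstrip (t : List Char) (hd : t.all pvDomChar = true) :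
    rstripSetB (PySem.Chars.rstrip t) = rstripSetB t := by
  unfold rstripSetB PySem.Chars.rstrip
  rw [List.reverse_reverse]
  rw [dw_imp _ _ t.reverse]
  intro c hc hs
  exact isspace_imp_rset c (by rw [List.all_eq_true] at hd; exact hd c (by simpa using hc)) hs

theorem dom_sublist {t s : List Char} (h : List.Sublist t s) (hs : s.all pvDomChar = true) :
    t.all pvDomChar = true := by
  rw [List.all_eq_true] at *
  exact fun c hc => hs c (h.subset hc)

theorem dom_strip (s : List Char) (hs : s.all pvDomChar = true) :
    (PySem.Chars.strip s).all pvDomChar = true := by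
  unfold PySem.Chars.strip PySem.Chars.rstrip PySem.Chars.lstrip
  rw [List.all_reverse]
  refine dom_sublist (List.dropWhile_sublist _) ?_
  rw [List.all_reverse]
  exact dom_sublist (List.dropWhile_sublist _) hs

-- invariant carried through one suffix-stripping step
def GoodL1 (s0 : List Char) (r : List Char × Bool) : Prop :=
  r.1.all pvDomChar = true ∧ PySem.Chars.lstrip r.1 = r.1 ∧ PySem.Chars.rstrip r.1 = r.1 ∧
    rstripSetB r.1 = rstripSetB s0

theorem sufStep_good (suf : List Char) (hsuf : ∀ c ∈ suf, rsetChars.contains c = true)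
    (s0 : List Char) (r : List Char × Bool) (hg : GoodL1 s0 r) : GoodL1 s0 (sufStep r suf) := by
  obtain ⟨hd, hl, hr, hb⟩ := hg
  unfold sufStep
  split
  case isTrue h =>
    obtain ⟨xs, hxs⟩ := (PySem.Chars.endswith_iff _ _).mp h
    have hcut : cutStrip r.1 suf.length = PySem.Chars.strip xs := by
      unfold cutStrip
      rw [← hxs, show (xs ++ suf).length - suf.length = xs.length from by simp]
      rw [List.take_left]
    have hxsd : xs.all pvDomChar = true := by
      refine dom_sublist ?_ hd
      rw [← hxs]; exact List.sublist_append_left xs suf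
    have hxl : PySem.Chars.lstrip xs = xs := by
      have : xs = r.1.take xs.length := by rw [← hxs, List.take_left]
      rw [this]; exact lstrip_take _ _ hl
    have hstrip : PySem.Chars.strip xs = PySem.Chars.rstrip xs := by
      unfold PySem.Chars.strip; rw [hxl]
    refine ⟨?_, ?_, ?_, ?_⟩
    · simpa only [hcut] using dom_strip xs hxsd
    · simp only [hcut]; exact lstrip_strip xs
    · simp only [hcut]; exact rstrip_strip xs
    · simp only [hcut, hstrip]
      rw [rb_rstrip xs hxsd, ← hb, ← hxs, rb_append_all xs suf hsuf]
  case isFalse h => exact ⟨hd, hl, hr, hb⟩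

theorem onePassA_good (s : List Char) (hd : s.all pvDomChar = true)
    (hl : PySem.Chars.lstrip s = s) (hr : PySem.Chars.rstrip s = s) : GoodL1 s (onePassA s) := by
  unfold onePassA
  simp only [List.foldl_cons, List.foldl_nil]
  have g0 : GoodL1 s (s, false) := ⟨hd, hl, hr, rfl⟩
  have g1 := sufStep_good ['*'] (by intro c hc; fin_cases hc; rfl) s _ g0
  have g2 := sufStep_good ['&'] (by intro c hc; fin_cases hc; rfl) s _ g1
  exact sufStep_good ['&', '&'] (by intro c hc; fin_cases hc <;> rfl) s _ g2

theorem onePassA_false (s s' : List Char) (h : onePassA s = (s', false)) :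
    s' = s ∧ PySem.Chars.endswith s ['*'] = false ∧ PySem.Chars.endswith s ['&'] = false := by
  unfold onePassA sufStep at h
  simp only [List.foldl_cons, List.foldl_nil] at h
  split_ifs at h <;> simp_all

theorem rb_of_clean (s : List Char) (hd : s.all pvDomChar = true)
    (hr : PySem.Chars.rstrip s = s)
    (h1 : PySem.Chars.endswith s ['*'] = false) (h2 : PySem.Chars.endswith s ['&'] = false) :
    rstripSetB s = s := by
  cases hrev : s.reverse with
  | nil => rw [show s = [] from by simpa using congrArg List.reverse hrev]; rfl
  | cons c r =>
    have hs : s = r.reverse ++ [c] := by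
      have := congrArg List.reverse hrev
      simpa using this
    have hdc : pvDomChar c = true := by
      rw [List.all_eq_true] at hd
      exact hd c (by rw [hs]; simp)
    have hcs : PySem.Chars.isspace c = false := by
      by_contra hcs
      rw [Bool.not_eq_false] at hcs
      have : PySem.Chars.rstrip s ≠ s := by
        unfold PySem.Chars.rstrip
        rw [hrev, List.dropWhile_cons, if_pos hcs]
        intro heq
        have := congrArg List.length heq
        have hlen := List.length_dropWhile_le PySem.Chars.isspace r
        rw [List.length_reverse] at this
        have : s.length = r.length + 1 := by
          rw [hs]; simp
        omega
      exact this hr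
    have hcstar : c ≠ '*' := by
      intro hc; subst hc
      rw [hs] at h1
      have : PySem.Chars.endswith (r.reverse ++ ['*']) ['*'] = true :=
        (PySem.Chars.endswith_iff _ _).mpr ⟨r.reverse, rfl⟩
      simp [this] at h1
    have hcamp : c ≠ '&' := by
      intro hc; subst hc
      rw [hs] at h2
      have : PySem.Chars.endswith (r.reverse ++ ['&']) ['&'] = true :=
        (PySem.Chars.endswith_iff _ _).mpr ⟨r.reverse, rfl⟩
      simp [this] at h2
    have hnc : rsetChars.contains c = false := by
      rw [rset_dom c hdc, hcs]
      simp [hcstar, hcamp]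
    rw [hs]
    exact rb_last_not _ _ hnc

theorem L1 (s : List Char) (hd : s.all pvDomChar = true)
    (hl : PySem.Chars.lstrip s = s) (hr : PySem.Chars.rstrip s = s) :
    stripSuffixesA s = rstripSetB s := by
  induction s using stripSuffixesA.induct with
  | case1 s s' h ih =>
    have hg := onePassA_good s hd hl hr
    rw [h] at hg
    obtain ⟨g1, g2, g3, g4⟩ := hg
    have e : stripSuffixesA s = stripSuffixesA s' := by rw [stripSuffixesA, h]
    rw [e, ih g1 g2 g3]
    exact g4
  | case2 s s' h =>
    obtain ⟨hss, h1, h2⟩ := onePassA_false s s' h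
    subst hss
    have e : stripSuffixesA s' = s' := by rw [stripSuffixesA, h]
    rw [e]
    exact (rb_of_clean s' hd hr h1 h2).symm



theorem go_mem (s : List Char) : ∀ (cur : List Char) (acc : List (List Char)) (t : List Char),
    cur.all (fun c => !PySem.Chars.isspace c) = true →
    t ∈ PySem.Chars.split₀.go s cur acc →
    t ∈ acc ∨ (t ≠ [] ∧ t.all (fun c => !PySem.Chars.isspace c) = true ∧ ∀ c ∈ t, c ∈ cur ∨ c ∈ s) := by
  induction s with
  | nil =>
    intro cur acc t hcur ht
    rw [PySem.Chars.split₀.go] at ht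
    split at ht
    · exact Or.inl (by simpa using ht)
    case isFalse hne =>
      rw [List.mem_reverse, List.mem_cons] at ht
      rcases ht with ht | ht
      · subst ht
        refine Or.inr ⟨fun he => hne (by simp [List.isEmpty_iff, ← List.reverse_eq_nil_iff, he]), by simpa using hcur, ?_⟩
        intro c hc; exact Or.inl (by simpa using hc)
      · exact Or.inl (by simpa using ht)
  | cons a rest ih =>
    intro cur acc t hcur ht
    rw [PySem.Chars.split₀.go] at ht
    split at ht
    · split at ht
      · rcases ih [] acc t (by simp) ht with h | ⟨h1, h2, h3⟩
        · exact Or.inl h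
        · refine Or.inr ⟨h1, h2, fun c hc => ?_⟩
          rcases h3 c hc with h | h
          · simp at h
          · exact Or.inr (List.mem_cons_of_mem a h)
      case isFalse hne =>
        rcases ih [] (cur.reverse :: acc) t (by simp) ht with h | ⟨h1, h2, h3⟩
        · rw [List.mem_cons] at h
          rcases h with h | h
          · subst h
            refine Or.inr ⟨fun he => hne (by simp [List.isEmpty_iff, ← List.reverse_eq_nil_iff, he]), by simpa using hcur, ?_⟩
            intro c hc; exact Or.inl (by simpa using hc)
          · exact Or.inl h
        · refine Or.inr ⟨h1, h2, fun c hc => ?_⟩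
          rcases h3 c hc with h | h
          · simp at h
          · exact Or.inr (List.mem_cons_of_mem a h)
    case isFalse hsp =>
      rcases ih (a :: cur) acc t (by simp_all) ht with h | ⟨h1, h2, h3⟩
      · exact Or.inl h
      · refine Or.inr ⟨h1, h2, fun c hc => ?_⟩
        rcases h3 c hc with h | h
        · rw [List.mem_cons] at h
          rcases h with h | h
          · exact Or.inr (by simp [h])
          · exact Or.inl h
        · exact Or.inr (List.mem_cons_of_mem a h)

theorem split₀_token (u t : List Char) (ht : t ∈ PySem.Chars.split₀ u) :
    t ≠ [] ∧ t.all (fun c => !PySem.Chars.isspace c) = true ∧ ∀ c ∈ t, c ∈ u := by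
  have := go_mem u [] [] t (by simp) ht
  rcases this with h | ⟨h1, h2, h3⟩
  · simp at h
  · refine ⟨h1, h2, fun c hc => ?_⟩
    rcases h3 c hc with h | h
    · simp at h
    · exact h

theorem mem_join (sep : List Char) (ts : List (List Char)) (c : Char)
    (h : c ∈ PySem.Chars.join sep ts) : c ∈ sep ∨ ∃ t ∈ ts, c ∈ t := by
  induction ts with
  | nil => rw [PySem.Chars.join_nil] at h; simp at h
  | cons t ts ih =>
    cases ts with
    | nil =>
      rw [PySem.Chars.join_singleton] at h
      exact Or.inr ⟨t, by simp, h⟩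
    | cons u us =>
      rw [PySem.Chars.join_cons_cons, List.append_assoc, List.mem_append] at h
      rcases h with h | h
      · exact Or.inr ⟨t, by simp, h⟩
      · rw [List.mem_append] at h
        rcases h with h | h
        · exact Or.inl h
        · rcases ih h with h | ⟨v, hv, hc⟩
          · exact Or.inl h
          · exact Or.inr ⟨v, by simp [List.mem_cons] at hv ⊢; tauto, hc⟩

-- join of nonempty all-nonspace tokens is strip-free
theorem lstrip_join (ts : List (List Char))
    (h : ∀ t ∈ ts, t ≠ [] ∧ t.all (fun c => !PySem.Chars.isspace c) = true) :
    PySem.Chars.lstrip (PySem.Chars.join [' '] ts) = PySem.Chars.join [' '] ts := by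
  cases ts with
  | nil => rfl
  | cons t ts =>
    have ht := h t (by simp)
    obtain ⟨c, t', rfl⟩ : ∃ c t', t = c :: t' := by
      cases t with
      | nil => exact absurd rfl ht.1
      | cons c t' => exact ⟨c, t', rfl⟩
    have hc : PySem.Chars.isspace c = false := by
      have := ht.2
      simp [List.all_cons] at this
      simp [this.1]
    have hexp : ∃ r, PySem.Chars.join [' '] ((c :: t') :: ts) = c :: r := by
      cases ts with
      | nil => exact ⟨t', by rw [PySem.Chars.join_singleton]⟩
      | cons u us => exact ⟨t' ++ [' '] ++ PySem.Chars.join [' '] (u :: us), by rw [PySem.Chars.join_cons_cons]; simp⟩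
    obtain ⟨r, hr⟩ := hexp
    rw [hr]
    unfold PySem.Chars.lstrip
    rw [List.dropWhile_cons, if_neg (by simp [hc])]

theorem rstrip_append_clean (a b : List Char) (hb : PySem.Chars.rstrip b = b) (hne : b ≠ []) :
    PySem.Chars.rstrip (a ++ b) = a ++ b := by
  unfold PySem.Chars.rstrip at *
  obtain ⟨c, r, hrev⟩ : ∃ c r, b.reverse = c :: r := by
    cases hb2 : b.reverse with
    | nil => exact absurd (by simpa using congrArg List.reverse hb2) hne
    | cons c r => exact ⟨c, r, rfl⟩
  have hcs : PySem.Chars.isspace c = false := by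
    by_contra hcs
    rw [Bool.not_eq_false] at hcs
    rw [hrev, List.dropWhile_cons, if_pos hcs] at hb
    have := congrArg List.length hb
    have h1 := List.length_dropWhile_le PySem.Chars.isspace r
    have h2 : b.length = r.length + 1 := by
      have := congrArg List.length hrev; simpa using this
    rw [List.length_reverse] at this
    omega
  rw [List.reverse_append, hrev, List.cons_append, List.dropWhile_cons, if_neg (by simp [hcs])]
  rw [← List.cons_append, ← hrev, ← List.reverse_append]
  simp

theorem rstrip_join (ts : List (List Char))
    (h : ∀ t ∈ ts, t ≠ [] ∧ t.all (fun c => !PySem.Chars.isspace c) = true) :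
    PySem.Chars.rstrip (PySem.Chars.join [' '] ts) = PySem.Chars.join [' '] ts := by
  induction ts with
  | nil => rfl
  | cons t ts ih =>
    cases ts with
    | nil =>
      rw [PySem.Chars.join_singleton]
      have ht := h t (by simp)
      -- t all nonspace: rstrip t = t
      unfold PySem.Chars.rstrip
      rw [List.dropWhile_eq_self_iff.mpr, List.reverse_reverse]
      intro hl
      have := ht.2
      rw [List.all_eq_true] at this
      have hmem : t.reverse[0] ∈ t := by
        rw [← List.mem_reverse]; exact List.getElem_mem hl
      simpa using this _ hmem
    | cons u us =>
      rw [PySem.Chars.join_cons_cons]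
      have hb : PySem.Chars.join [' '] (u :: us) ≠ [] := by
        intro he
        have hu := h u (by simp)
        cases us with
        | nil => rw [PySem.Chars.join_singleton] at he; exact hu.1 he
        | cons v vs =>
          rw [PySem.Chars.join_cons_cons] at he
          simp at he
      exact rstrip_append_clean _ _ (ih (fun t ht => h t (by simp [ht]))) hb

theorem strip_join (ts : List (List Char))
    (h : ∀ t ∈ ts, t ≠ [] ∧ t.all (fun c => !PySem.Chars.isspace c) = true) :
    PySem.Chars.strip (PySem.Chars.join [' '] ts) = PySem.Chars.join [' '] ts := by
  unfold PySem.Chars.strip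
  rw [lstrip_join ts h, rstrip_join ts h]

theorem tw_take (ch : Char) : ∀ (s : List Char) (k : Nat),
    (∀ i, i < k → s[i]? ≠ some ch) → s[k]? = some ch →
    List.takeWhile (fun c => decide (c ≠ ch)) s = s.take k := by
  intro s
  induction s with
  | nil => intro k h1 h2; simp at h2
  | cons a t ih =>
    intro k h1 h2
    cases k with
    | zero =>
      simp at h2
      subst h2
      rw [List.takeWhile_cons, if_neg (by simp)]
      rfl
    | succ k =>
      have ha : a ≠ ch := by
        have := h1 0 (Nat.succ_pos k)
        simpa using this
      rw [List.takeWhile_cons, if_pos (by simp [ha]), List.take_succ_cons]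
      rw [ih k (fun i hi => by simpa using h1 (i+1) (by omega)) (by simpa using h2)]

-- first-occurrence characterization via Chars.find
theorem find_mem_char (s : List Char) (ch : Char) (h : PySem.Chars.isIn [ch] s = true) :
    0 ≤ PySem.Chars.find s [ch] ∧
    s[(PySem.Chars.find s [ch]).toNat]? = some ch ∧
    ∀ i, i < (PySem.Chars.find s [ch]).toNat → s[i]? ≠ some ch := by
  have hnn : 0 ≤ PySem.Chars.find s [ch] := by
    rw [PySem.Chars.find_nonneg_iff]
    rw [PySem.Chars.isIn_iff_infix] at h
    exact h
  obtain ⟨hpre, hmin⟩ := PySem.Chars.find_spec hnn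
  refine ⟨hnn, ?_, ?_⟩
  · obtain ⟨t, hteq⟩ := hpre
    have : (List.drop (PySem.Chars.find s [ch]).toNat s).head? = some ch := by
      rw [← hteq]; rfl
    rw [List.head?_drop] at this
    exact this
  · intro i hi hcontra
    apply hmin i hi
    have : (List.drop i s).head? = some ch := by rw [List.head?_drop]; exact hcontra
    obtain ⟨c', t', hct⟩ : ∃ c' t', List.drop i s = c' :: t' := by
      cases hd : List.drop i s with
      | nil => rw [hd] at this; simp at this
      | cons c' t' => exact ⟨c', t', rfl⟩
    rw [hct] at this ⊢
    simp at this
    subst this; exact ⟨t', rfl⟩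

theorem slice_take (s : List Char) (k : Int) (hk : 0 ≤ k) :
    PySem.List.slice s none (some k) = s.take k.toNat := by
  have : k = ((k.toNat : Nat) : Int) := by omega
  rw [this]
  simp [pysem]

-- the A-side comma/template cut equals the B-side find/slice cut
theorem cut_eq (s : List Char) (ch : Char) (h : PySem.Chars.isIn [ch] s = true) :
    List.takeWhile (fun c => decide (c ≠ ch)) s
      = PySem.List.slice s none (some (PySem.Chars.find s [ch])) := by
  obtain ⟨hnn, hat, hbefore⟩ := find_mem_char s ch h
  rw [slice_take s _ hnn]
  exact tw_take ch s _ hbefore hat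

-- ---- the smart-pointer unwrap: A's six-prefix loop = B's std::-cut plus three-prefix loop ----

theorem isIn_false_find (t : List Char) (ch : Char) (h : PySem.Chars.isIn [ch] t = false) :
    PySem.Chars.find t [ch] = -1 := by
  have : PySem.Chars.isIn [ch] t = (PySem.Chars.find t [ch] != -1) := rfl
  rw [this] at h
  simpa using h

theorem postA_eq_peelB (t : List Char) :
    (if PySem.Chars.isIn [','] (if PySem.Chars.endswith t ['>'] = true then t.dropLast else t) = true
     then List.takeWhile (fun c => decide (c ≠ ','))
            (if PySem.Chars.endswith t ['>'] = true then t.dropLast else t)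
     else (if PySem.Chars.endswith t ['>'] = true then t.dropLast else t)) = peelB t := by
  unfold peelB
  dsimp only
  by_cases he : PySem.Chars.endswith t ['>'] = true
  · simp only [he, if_true]
    by_cases hin : PySem.Chars.isIn [','] t.dropLast = true
    · have hf : PySem.Chars.find t.dropLast [','] ≠ -1 := by
        have : PySem.Chars.isIn [','] t.dropLast = (PySem.Chars.find t.dropLast [','] != -1) := rfl
        rw [this] at hin
        simpa using hin
      rw [if_pos hin, if_pos hf]
      exact cut_eq _ ',' hin
    · have hin' : PySem.Chars.isIn [','] t.dropLast = false := by simpa using hin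
      have hf : PySem.Chars.find t.dropLast [','] = -1 := isIn_false_find _ ',' hin'
      rw [if_neg hin, if_neg (by simp [hf])]
  · have he' : PySem.Chars.endswith t ['>'] = false := by simpa using he
    simp only [he', Bool.false_eq_true, if_false]
    by_cases hin : PySem.Chars.isIn [','] t = true
    · have hf : PySem.Chars.find t [','] ≠ -1 := by
        have : PySem.Chars.isIn [','] t = (PySem.Chars.find t [','] != -1) := rfl
        rw [this] at hin
        simpa using hin
      rw [if_pos hin, if_pos hf]
      exact cut_eq _ ',' hin
    · have hin' : PySem.Chars.isIn [','] t = false := by simpa using hin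
      have hf : PySem.Chars.find t [','] = -1 := isIn_false_find _ ',' hin'
      rw [if_neg hin, if_neg (by simp [hf])]

theorem startswith_trans {s p q : List Char} (h1 : PySem.Chars.startswith s p = true)
    (h2 : PySem.Chars.startswith p q = true) : PySem.Chars.startswith s q = true := by
  rw [PySem.Chars.startswith_iff] at *
  exact h2.trans h1

theorem unwrap_eq (s : List Char) :
    unwrapA smartPrefixesA s = Option.map peelB (findPrefixB bPtrPrefixes (stdCutB s)) := by
  have e1 : ("std::shared_ptr<".toList : List Char) = "std::".toList ++ "shared_ptr<".toList := by decide
  have e2 : ("std::unique_ptr<".toList : List Char) = "std::".toList ++ "unique_ptr<".toList := by decide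
  have e3 : ("std::weak_ptr<".toList : List Char) = "std::".toList ++ "weak_ptr<".toList := by decide
  have hsp : smartPrefixesA = ["std::shared_ptr<".toList, "shared_ptr<".toList,
      "std::unique_ptr<".toList, "unique_ptr<".toList, "std::weak_ptr<".toList,
      "weak_ptr<".toList] := by decide
  have hbp : bPtrPrefixes = ["shared_ptr<".toList, "unique_ptr<".toList, "weak_ptr<".toList] := by decide
  by_cases hstd : PySem.Chars.startswith s "std::".toList = true
  · obtain ⟨rest, hrest⟩ := (PySem.Chars.startswith_iff s _).mp hstd
    subst hrest
    have hcut : stdCutB ("std::".toList ++ rest) = rest := by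
      unfold stdCutB
      rw [if_pos hstd]
      rw [show (5 : Nat) = ("std::".toList : List Char).length from rfl, List.drop_left]
    rw [hcut, hsp, hbp]
    have hb1 : PySem.Chars.startswith ("std::".toList ++ rest) "shared_ptr<".toList = false := by
      simp [PySem.Chars.startswith, List.isPrefixOf]
    have hb2 : PySem.Chars.startswith ("std::".toList ++ rest) "unique_ptr<".toList = false := by
      simp [PySem.Chars.startswith, List.isPrefixOf]
    have hb3 : PySem.Chars.startswith ("std::".toList ++ rest) "weak_ptr<".toList = false := by
      simp [PySem.Chars.startswith, List.isPrefixOf]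
    have hs1 : PySem.Chars.startswith ("std::".toList ++ rest) "std::shared_ptr<".toList
        = PySem.Chars.startswith rest "shared_ptr<".toList := by
      rw [Bool.eq_iff_iff, PySem.Chars.startswith_iff, PySem.Chars.startswith_iff, e1]
      exact List.prefix_append_right_inj _
    have hs2 : PySem.Chars.startswith ("std::".toList ++ rest) "std::unique_ptr<".toList
        = PySem.Chars.startswith rest "unique_ptr<".toList := by
      rw [Bool.eq_iff_iff, PySem.Chars.startswith_iff, PySem.Chars.startswith_iff, e2]
      exact List.prefix_append_right_inj _
    have hs3 : PySem.Chars.startswith ("std::".toList ++ rest) "std::weak_ptr<".toList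
        = PySem.Chars.startswith rest "weak_ptr<".toList := by
      rw [Bool.eq_iff_iff, PySem.Chars.startswith_iff, PySem.Chars.startswith_iff, e3]
      exact List.prefix_append_right_inj _
    have hd1 : ("std::".toList ++ rest).drop ("std::shared_ptr<".toList).length
        = rest.drop ("shared_ptr<".toList).length := by
      rw [show ("std::shared_ptr<".toList).length = ("std::".toList : List Char).length + ("shared_ptr<".toList).length from rfl]
      exact List.drop_length_add_append _
    have hd2 : ("std::".toList ++ rest).drop ("std::unique_ptr<".toList).length
        = rest.drop ("unique_ptr<".toList).length := by
      rw [show ("std::unique_ptr<".toList).length = ("std::".toList : List Char).length + ("unique_ptr<".toList).length from rfl]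
      exact List.drop_length_add_append _
    have hd3 : ("std::".toList ++ rest).drop ("std::weak_ptr<".toList).length
        = rest.drop ("weak_ptr<".toList).length := by
      rw [show ("std::weak_ptr<".toList).length = ("std::".toList : List Char).length + ("weak_ptr<".toList).length from rfl]
      exact List.drop_length_add_append _
    simp only [unwrapA, findPrefixB, hb1, hb2, hb3, hs1, hs2, hs3, hd1, hd2, hd3,
      Bool.false_eq_true, if_false]
    by_cases c1 : PySem.Chars.startswith rest "shared_ptr<".toList = true
    · simp only [c1, if_true, Option.map_some]
      exact congrArg some (postA_eq_peelB _)
    · rw [Bool.not_eq_true] at c1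
      simp only [c1, Bool.false_eq_true, if_false]
      by_cases c2 : PySem.Chars.startswith rest "unique_ptr<".toList = true
      · simp only [c2, if_true, Option.map_some]
        exact congrArg some (postA_eq_peelB _)
      · rw [Bool.not_eq_true] at c2
        simp only [c2, Bool.false_eq_true, if_false]
        by_cases c3 : PySem.Chars.startswith rest "weak_ptr<".toList = true
        · simp only [c3, if_true, Option.map_some]
          exact congrArg some (postA_eq_peelB _)
        · rw [Bool.not_eq_true] at c3
          simp only [c3, Bool.false_eq_true, if_false, Option.map_none]
  · have hstd' : PySem.Chars.startswith s "std::".toList = false := by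
      simpa using hstd
    have hcut : stdCutB s = s := by
      unfold stdCutB
      rw [hstd']
      simp
    have hn1 : PySem.Chars.startswith s "std::shared_ptr<".toList = false := by
      by_contra hcon
      rw [Bool.not_eq_false] at hcon
      have := startswith_trans hcon (q := "std::".toList) (by decide)
      rw [hstd'] at this; exact Bool.false_ne_true this
    have hn2 : PySem.Chars.startswith s "std::unique_ptr<".toList = false := by
      by_contra hcon
      rw [Bool.not_eq_false] at hcon
      have := startswith_trans hcon (q := "std::".toList) (by decide)
      rw [hstd'] at this; exact Bool.false_ne_true this
    have hn3 : PySem.Chars.startswith s "std::weak_ptr<".toList = false := by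
      by_contra hcon
      rw [Bool.not_eq_false] at hcon
      have := startswith_trans hcon (q := "std::".toList) (by decide)
      rw [hstd'] at this; exact Bool.false_ne_true this
    rw [hcut, hsp, hbp]
    simp only [unwrapA, findPrefixB, hn1, hn2, hn3, Bool.false_eq_true, if_false]
    by_cases c1 : PySem.Chars.startswith s "shared_ptr<".toList = true
    · simp only [c1, if_true, Option.map_some]
      exact congrArg some (postA_eq_peelB _)
    · rw [Bool.not_eq_true] at c1
      simp only [c1, Bool.false_eq_true, if_false]
      by_cases c2 : PySem.Chars.startswith s "unique_ptr<".toList = true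
      · simp only [c2, if_true, Option.map_some]
        exact congrArg some (postA_eq_peelB _)
      · rw [Bool.not_eq_true] at c2
        simp only [c2, Bool.false_eq_true, if_false]
        by_cases c3 : PySem.Chars.startswith s "weak_ptr<".toList = true
        · simp only [c3, if_true, Option.map_some]
          exact congrArg some (postA_eq_peelB _)
        · rw [Bool.not_eq_true] at c3
          simp only [c3, Bool.false_eq_true, if_false, Option.map_none]

-- A's template cut in the none-branch equals B's find/slice cut with the final strip
theorem dom_pipeline (s : List Char) (hd : s.all pvDomChar = true) :
    (PySem.Chars.join [' '] ((PySem.Chars.split₀ s).dropWhile (fun t => qualWords.contains t))).all pvDomChar = true := by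
  rw [List.all_eq_true]
  intro c hc
  rcases mem_join _ _ c hc with h | ⟨t, ht, hct⟩
  · simp at h; subst h; rfl
  · have ht2 : t ∈ PySem.Chars.split₀ s := (List.dropWhile_sublist _).subset ht
    have := (split₀_token s t ht2).2.2 c hct
    rw [List.all_eq_true] at hd
    exact hd c this

theorem dom_rb (s : List Char) (hd : s.all pvDomChar = true) :
    (rstripSetB s).all pvDomChar = true := by
  unfold rstripSetB
  rw [List.all_reverse]
  refine dom_sublist (List.dropWhile_sublist _) ?_
  rw [List.all_reverse]
  exact hd

theorem findPrefixB_some_drop (ps : List (List Char)) (t r : List Char)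
    (h : findPrefixB ps t = some r) : ∃ k, r = t.drop k := by
  induction ps with
  | nil => simp [findPrefixB] at h
  | cons p ps ih =>
    rw [findPrefixB] at h
    split at h
    · exact ⟨p.length, by simpa using h.symm⟩
    · exact ih h

theorem slice_sublist {α : Type} (xs : List α) (a b : Option Int) :
    List.Sublist (PySem.List.slice xs a b) xs := by
  unfold PySem.List.slice
  exact List.Sublist.trans (List.take_sublist _ _) (List.drop_sublist _ _)

theorem peelB_sublist (x : List Char) : List.Sublist (peelB x) x := by
  unfold peelB
  dsimp only
  have h1 : List.Sublist (if PySem.Chars.endswith x ['>'] = true then x.dropLast else x) x := by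
    split
    · exact List.dropLast_sublist x
    · exact List.Sublist.refl x
  by_cases hc : PySem.Chars.find (if PySem.Chars.endswith x ['>'] = true then x.dropLast else x) [','] ≠ -1
  · rw [if_pos hc]
    exact List.Sublist.trans (slice_sublist _ _ _) h1
  · rw [if_neg hc]
    exact h1

theorem stdCutB_sublist (x : List Char) : List.Sublist (stdCutB x) x := by
  unfold stdCutB
  split
  · exact List.drop_sublist _ _
  · exact List.Sublist.refl x

theorem normA_eq_normB (raw : List Char) :
    raw.all pvDomChar = true → normA raw = normB raw := by
  induction raw using normA.induct with
  | case1 raw s hs =>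
    intro hd
    rw [normA, normB]
    dsimp only
    rw [dif_pos hs, dif_pos hs]
  | case2 raw s hs s1 s2 inner hu ih =>
    intro hd
    have hds : (PySem.Chars.strip raw).all pvDomChar = true := dom_strip raw hd
    simp only [s2, s1, s] at hu
    have hs2 : stripQualifiersA (stripSuffixesA (PySem.Chars.strip raw))
        = PySem.Chars.join [' '] ((PySem.Chars.split₀ (rstripSetB (PySem.Chars.strip raw))).dropWhile
            (fun t => qualWords.contains t)) := by
      unfold stripQualifiersA
      rw [L1 _ hds (lstrip_strip raw) (rstrip_strip raw), dropQualA_eq_dropWhile]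
    rw [unwrap_eq] at hu
    cases hfp : findPrefixB bPtrPrefixes (stdCutB (stripQualifiersA (stripSuffixesA (PySem.Chars.strip raw)))) with
    | none => rw [hfp] at hu; simp at hu
    | some rest =>
      rw [hfp] at hu
      simp only [Option.map_some, Option.some.injEq] at hu
      have eA : normA raw = normA inner := by
        rw [normA]
        dsimp only
        rw [dif_neg hs]
        rw [show unwrapA smartPrefixesA (stripQualifiersA (stripSuffixesA (PySem.Chars.strip raw)))
            = some inner from by rw [unwrap_eq, hfp]; simp [hu]]
      have eB : normB raw = normB (peelB rest) := by
        rw [normB]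
        dsimp only
        rw [dif_neg hs]
        rw [show findPrefixB bPtrPrefixes (stdCutB (PySem.Chars.join [' ']
            ((PySem.Chars.split₀ (rstripSetB (PySem.Chars.strip raw))).dropWhile
              (fun t => qualWords.contains t)))) = some rest from by rw [← hs2]; exact hfp]
      have hdom2 : (stripQualifiersA (stripSuffixesA (PySem.Chars.strip raw))).all pvDomChar = true := by
        rw [hs2]
        exact dom_pipeline _ (dom_rb _ hds)
      have hdinner : inner.all pvDomChar = true := by
        obtain ⟨k, hk⟩ := findPrefixB_some_drop _ _ _ hfp
        rw [← hu]
        refine dom_sublist (peelB_sublist rest) ?_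
        rw [hk]
        exact dom_sublist ((List.drop_sublist _ _).trans (stdCutB_sublist _)) hdom2
      have hfin := ih hdinner
      rw [← hu] at hfin
      rw [eA, eB, ← hu]
      exact hfin
  | case3 raw s hs s1 s2 hu hin =>
    intro hd
    have hds : (PySem.Chars.strip raw).all pvDomChar = true := dom_strip raw hd
    simp only [s2, s1, s] at hu hin
    have hs2 : stripQualifiersA (stripSuffixesA (PySem.Chars.strip raw))
        = PySem.Chars.join [' '] ((PySem.Chars.split₀ (rstripSetB (PySem.Chars.strip raw))).dropWhile
            (fun t => qualWords.contains t)) := by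
      unfold stripQualifiersA
      rw [L1 _ hds (lstrip_strip raw) (rstrip_strip raw), dropQualA_eq_dropWhile]
    rw [unwrap_eq] at hu
    have hfp : findPrefixB bPtrPrefixes (stdCutB (stripQualifiersA (stripSuffixesA (PySem.Chars.strip raw)))) = none := by
      cases hfp2 : findPrefixB bPtrPrefixes (stdCutB (stripQualifiersA (stripSuffixesA (PySem.Chars.strip raw)))) with
      | none => rfl
      | some rest => rw [hfp2] at hu; simp at hu
    have hfind : PySem.Chars.find (stripQualifiersA (stripSuffixesA (PySem.Chars.strip raw))) ['<'] ≠ -1 := by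
      have : PySem.Chars.isIn ['<'] (stripQualifiersA (stripSuffixesA (PySem.Chars.strip raw)))
          = (PySem.Chars.find (stripQualifiersA (stripSuffixesA (PySem.Chars.strip raw))) ['<'] != -1) := rfl
      rw [this] at hin
      simpa using hin
    rw [normA, normB]
    dsimp only
    rw [dif_neg hs, dif_neg hs]
    rw [show unwrapA smartPrefixesA (stripQualifiersA (stripSuffixesA (PySem.Chars.strip raw)))
        = none from by rw [unwrap_eq, hfp]; rfl]
    rw [show findPrefixB bPtrPrefixes (stdCutB (PySem.Chars.join [' ']
        ((PySem.Chars.split₀ (rstripSetB (PySem.Chars.strip raw))).dropWhile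
          (fun t => qualWords.contains t)))) = none from by rw [← hs2]; exact hfp]
    rw [if_pos hin]
    rw [← hs2]
    rw [show ((PySem.Chars.find (stripQualifiersA (stripSuffixesA (PySem.Chars.strip raw))) ['<'] == -1)) = false from by simpa using hfind]
    rw [if_neg (by simp)]
    exact congrArg PySem.Chars.strip (cut_eq _ '<' hin)
  | case4 raw s hs s1 s2 hu hin =>
    intro hd
    have hds : (PySem.Chars.strip raw).all pvDomChar = true := dom_strip raw hd
    simp only [s2, s1, s] at hu hin
    have hs2 : stripQualifiersA (stripSuffixesA (PySem.Chars.strip raw))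
        = PySem.Chars.join [' '] ((PySem.Chars.split₀ (rstripSetB (PySem.Chars.strip raw))).dropWhile
            (fun t => qualWords.contains t)) := by
      unfold stripQualifiersA
      rw [L1 _ hds (lstrip_strip raw) (rstrip_strip raw), dropQualA_eq_dropWhile]
    rw [unwrap_eq] at hu
    have hfp : findPrefixB bPtrPrefixes (stdCutB (stripQualifiersA (stripSuffixesA (PySem.Chars.strip raw)))) = none := by
      cases hfp2 : findPrefixB bPtrPrefixes (stdCutB (stripQualifiersA (stripSuffixesA (PySem.Chars.strip raw)))) with
      | none => rfl
      | some rest => rw [hfp2] at hu; simp at hu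
    have hin' : PySem.Chars.isIn ['<'] (stripQualifiersA (stripSuffixesA (PySem.Chars.strip raw))) = false := by
      simpa using hin
    have hfind : PySem.Chars.find (stripQualifiersA (stripSuffixesA (PySem.Chars.strip raw))) ['<'] = -1 :=
      isIn_false_find _ '<' hin'
    rw [normA, normB]
    dsimp only
    rw [dif_neg hs, dif_neg hs]
    rw [show unwrapA smartPrefixesA (stripQualifiersA (stripSuffixesA (PySem.Chars.strip raw)))
        = none from by rw [unwrap_eq, hfp]; rfl]
    rw [show findPrefixB bPtrPrefixes (stdCutB (PySem.Chars.join [' ']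
        ((PySem.Chars.split₀ (rstripSetB (PySem.Chars.strip raw))).dropWhile
          (fun t => qualWords.contains t)))) = none from by rw [← hs2]; exact hfp]
    rw [if_neg (by rw [hin']; simp)]
    rw [← hs2]
    rw [show ((PySem.Chars.find (stripQualifiersA (stripSuffixesA (PySem.Chars.strip raw))) ['<'] == -1)) = true from by rw [hfind]; rfl]
    rw [if_pos rfl]
    rw [hs2]
    refine (strip_join _ ?_).symm
    intro t ht
    have ht2 : t ∈ PySem.Chars.split₀ (rstripSetB (PySem.Chars.strip raw)) := (List.dropWhile_sublist _).subset ht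
    have := split₀_token _ t ht2
    exact ⟨this.1, this.2.1⟩

-- ===== VERDICT (by name: the statement is the Claim_ definition above) =====
theorem normalize_type_name_py_spec : Claim_equal_normalize_type_name_py := by
  intro raw hdom
  unfold Spec_normalize_type_name_py normalize_type_name_py normalize_type_name_py_alt
  exact congrArg String.ofList (normA_eq_normB raw.toList hdom)
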